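-- pv_equiv track=rewrite | github.com/nicolasrnemeth/rxn-rule-induction-pipeline | utils/chemutils.py | max_intersecting_lists
-- ===== SOURCE A (Python) =====
-- from typing import Any, Dict, List, Optional, Set, Tuple
--
-- def max_intersecting_lists(dict1: Dict[int, List[int]], dict2: Dict[int, List[int]]) -> Optional[Tuple[int, int]]:
--     """
--     Finds the pair of sublists (one from each input list) with the highest number of intersecting integers.
--
--     In case of ties in intersection count, prefers the pair with fewer total elements.
--     If still tied, selects the first such pair encountered.
--
--     Args:
--         dict1 (Dict[int, List[int]]): First dict of lists of integers.
--         dict2 (Dict[int, List[int]]): Second dict of lists of integers.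
--
--     Returns:
--         Optional[Tuple[int, int]]: The pair of dict keys of lists with the highest intersection,
--         or None if either input list is empty.
--     """
--     max_intersection = -1
--     best_pair: Optional[Tuple[int, int]] = None
--     min_total_length = float('inf')
--
--     for key1, sublist1 in dict1.items():
--         set1 = set(sublist1)
--         for key2, sublist2 in dict2.items():
--             set2 = set(sublist2)
--             intersection_count = len(set1 & set2)
--             total_length = len(sublist1) + len(sublist2)
--
--             if (intersection_count > max_intersection
--                 or (intersection_count == max_intersection and total_length < min_total_length)
--                 or (intersection_count == max_intersection and total_length == min_total_length and best_pair is None)):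
--                 max_intersection = intersection_count
--                 min_total_length = total_length
--                 best_pair = (key1, key2)
--
--     return best_pair
-- ===== SOURCE B (Python) =====
-- from typing import Dict, List, Optional, Tuple
--
-- def max_intersecting_lists(dict1: Dict[int, List[int]], dict2: Dict[int, List[int]]) -> Optional[Tuple[int, int]]:
--     """Inverted index value -> keys of dict2; per key1 accumulate co-occurrence
--     counters instead of computing a set intersection for every pair."""
--     inv: Dict[int, List[int]] = {}
--     for key2, sublist2 in dict2.items():
--         for v in set(sublist2):
--             inv.setdefault(v, []).append(key2)
--     best = None  # (count, total_length, key1, key2)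
--     for key1, sublist1 in dict1.items():
--         n1 = len(sublist1)
--         cnt: Dict[int, int] = {}
--         for v in set(sublist1):
--             for key2 in inv.get(v, ()):
--                 cnt[key2] = cnt.get(key2, 0) + 1
--         for key2, sublist2 in dict2.items():
--             c = cnt.get(key2, 0)
--             t = n1 + len(sublist2)
--             if best is None or c > best[0] or (c == best[0] and t < best[1]):
--                 best = (c, t, key1, key2)
--     return None if best is None else (best[2], best[3])
-- ===== Notes on version B (the rewrite author's own statement) =====
-- stated objective: faster
-- what changed: Instead of computing a set intersection for every (key1, key2) pair, B builds an inverted index value->dict2-keys once and, per key1, accumulates co-occurrence counters, reducing per-pair work to a counter lookup.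
import Mathlib
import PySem

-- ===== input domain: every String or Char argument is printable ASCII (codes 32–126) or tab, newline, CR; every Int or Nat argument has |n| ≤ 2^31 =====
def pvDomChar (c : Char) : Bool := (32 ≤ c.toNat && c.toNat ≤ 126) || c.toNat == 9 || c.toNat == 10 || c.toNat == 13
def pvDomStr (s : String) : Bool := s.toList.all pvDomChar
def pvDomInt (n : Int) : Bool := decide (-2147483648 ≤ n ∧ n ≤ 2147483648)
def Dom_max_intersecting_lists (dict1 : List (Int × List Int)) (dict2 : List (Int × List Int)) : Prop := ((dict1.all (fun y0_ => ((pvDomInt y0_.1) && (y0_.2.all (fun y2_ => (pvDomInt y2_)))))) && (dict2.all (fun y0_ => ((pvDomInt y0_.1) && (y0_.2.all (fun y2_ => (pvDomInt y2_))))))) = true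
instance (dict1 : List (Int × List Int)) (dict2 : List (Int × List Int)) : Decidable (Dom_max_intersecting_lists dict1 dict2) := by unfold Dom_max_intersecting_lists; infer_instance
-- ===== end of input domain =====

-- B replaces A's per-pair set intersection with an inverted index (value → dict2 keys) and
-- per-key1 co-occurrence counters, so the inner work per pair drops to a counter lookup.

-- ===== PORT A =====
-- min_total_length starts as float('inf'); it is modelled exactly by `Option Int` with
-- `none` = +∞ (the Python only ever compares it with ints, via < and ==).
def pvLtInf (t : Int) (m : Option Int) : Bool :=
  match m with
  | none => true
  | some m => t < m

def pvEqInf (t : Int) (m : Option Int) : Bool :=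
  match m with
  | none => false
  | some m => t == m

def max_intersecting_lists (dict1 : List (Int × List Int)) (dict2 : List (Int × List Int)) : Option (Int × Int) :=
  -- state: (max_intersection, best_pair, min_total_length)
  let st := dict1.foldl (fun st p =>
    let set1 : PySem.Set Int := PySem.Set.ofList p.2
    dict2.foldl (fun st q =>
      let set2 : PySem.Set Int := PySem.Set.ofList q.2
      let ic : Int := PySem.Set.len (PySem.Set.inter set1 set2)
      let tl : Int := (p.2.length : Int) + (q.2.length : Int)
      if ic > st.1 || (ic == st.1 && pvLtInf tl st.2.2) || (ic == st.1 && pvEqInf tl st.2.2 && st.2.1.isNone)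
      then (ic, some (p.1, q.1), some tl) else st) st)
    ((-1 : Int), (none : Option (Int × Int)), (none : Option Int))
  st.2.1

-- ===== PORT B =====
def max_intersecting_lists_alt (dict1 : List (Int × List Int)) (dict2 : List (Int × List Int)) : Option (Int × Int) :=
  -- inv: inverted index value → list of dict2 keys whose list contains the value
  let inv : PySem.Dict Int (List Int) := dict2.foldl (fun inv q =>
    (PySem.Set.ofList q.2).foldl (fun inv v => inv.modify v [] (· ++ [q.1])) inv) PySem.Dict.empty
  -- best: (count, total_length, key1, key2)
  let best := dict1.foldl (fun best p =>
    let cnt : PySem.Dict Int Int := (PySem.Set.ofList p.2).foldl (fun cnt v =>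
      (inv.getD v []).foldl (fun cnt k2 => cnt.insert k2 (cnt.getD k2 0 + 1)) cnt) PySem.Dict.empty
    dict2.foldl (fun best q =>
      let c : Int := cnt.getD q.1 0
      let t : Int := (p.2.length : Int) + (q.2.length : Int)
      match best with
      | none => some (c, t, p.1, q.1)
      | some b => if c > b.1 || (c == b.1 && t < b.2.1) then some (c, t, p.1, q.1) else some b) best)
    (none : Option (Int × Int × Int × Int))
  best.map (fun b => (b.2.2.1, b.2.2.2))

-- ===== PRECONDITION & SPEC =====
-- The association lists stand for Python dicts, whose keys are necessarily distinct; B's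
-- per-key counters agree with A's per-entry intersections only under that dict invariant,
-- so Pre_ states it for dict2 (the dict whose keys index B's counters). Every input that
-- comes from an actual Python dict satisfies it.
def Pre_max_intersecting_lists (dict1 : List (Int × List Int)) (dict2 : List (Int × List Int)) : Prop :=
  (dict2.map Prod.fst).Nodup

instance (dict1 : List (Int × List Int)) (dict2 : List (Int × List Int)) : Decidable (Pre_max_intersecting_lists dict1 dict2) := by unfold Pre_max_intersecting_lists; infer_instance

def pvWitness_max_intersecting_lists : (List (Int × List Int)) × (List (Int × List Int)) :=
  ([(1, [1, 2]), (2, [3])], [(5, [2, 3]), (6, [4])])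

def Spec_max_intersecting_lists (dict1 : List (Int × List Int)) (dict2 : List (Int × List Int)) (out : Option (Int × Int)) : Prop := out = max_intersecting_lists_alt dict1 dict2
instance (dict1 : List (Int × List Int)) (dict2 : List (Int × List Int)) (out : Option (Int × Int)) : Decidable (Spec_max_intersecting_lists dict1 dict2 out) := by unfold Spec_max_intersecting_lists; infer_instance

-- ===== CLAIM (what is proved, stated in full; the proofs are below) =====
def Claim_equal_max_intersecting_lists : Prop := ∀ (dict1 : List (Int × List Int)) (dict2 : List (Int × List Int)), Dom_max_intersecting_lists dict1 dict2 → Pre_max_intersecting_lists dict1 dict2 → Spec_max_intersecting_lists dict1 dict2 (max_intersecting_lists dict1 dict2)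

-- ===== LEMMAS AND PROOFS =====

-- one dict2 entry's pass over set(sublist2) appends its key to inv[v] exactly when v is in the set
lemma inv_step (s : PySem.Set Int) (inv0 : PySem.Dict Int (List Int)) (k v : Int) (hnd : s.Nodup) :
    (s.foldl (fun inv w => inv.modify w [] (· ++ [k])) inv0).getD v []
    = inv0.getD v [] ++ (if v ∈ s then [k] else []) := by
  have h1 : (s.foldl (fun inv w => inv.modify w [] (· ++ [k])) inv0)
      = ((s.map (fun w => (w, k))).foldl (fun d p => d.modify p.1 [] (· ++ [p.2])) inv0) := by
    rw [List.foldl_map]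
  rw [h1, PySem.Dict.getD_foldl_modify_append]
  congr 1
  rw [List.filter_map, List.map_map]
  simp only [Function.comp_def]
  rw [List.map_const']
  have hlen : (List.filter (fun w : Int => w == v) s).length = s.count v := by
    rw [List.count, List.countP_eq_length_filter]
  rw [hlen]
  by_cases hv : v ∈ s
  · rw [List.count_eq_one_of_mem hnd hv]; simp [hv]
  · rw [List.count_eq_zero_of_not_mem hv]; simp [hv]

-- B's inverted index, characterised: inv[v] is the keys of the dict2 entries containing v, in order
lemma inv_getD (dict2 : List (Int × List Int)) (inv0 : PySem.Dict Int (List Int)) (v : Int) :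
    (dict2.foldl (fun inv q =>
      (PySem.Set.ofList q.2).foldl (fun inv w => inv.modify w [] (· ++ [q.1])) inv) inv0).getD v []
    = inv0.getD v [] ++ (dict2.filter (fun q => decide (v ∈ q.2))).map Prod.fst := by
  induction dict2 generalizing inv0 with
  | nil => simp
  | cons q rest ih =>
    rw [List.foldl_cons, ih]
    rw [inv_step _ _ _ _ (PySem.Set.nodup_ofList q.2)]
    rw [List.filter_cons]
    by_cases hv : v ∈ q.2
    · simp [hv, PySem.Set.mem_ofList]
    · simp [hv, PySem.Set.mem_ofList]

-- one of B's co-occurrence counters, characterised via the inverted index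
lemma cnt_getD (invL : Int → List Int) (vs : List Int) (cnt0 : PySem.Dict Int Int) (k : Int) :
    (vs.foldl (fun cnt v =>
      (invL v).foldl (fun cnt k2 => cnt.insert k2 (cnt.getD k2 0 + 1)) cnt) cnt0).getD k 0
    = cnt0.getD k 0 + ((vs.map (fun v => ((invL v).count k : Int))).sum) := by
  induction vs generalizing cnt0 with
  | nil => simp
  | cons v rest ih =>
    rw [List.foldl_cons, ih, PySem.Dict.getD_foldl_insert_add_one]
    simp
    ring

-- with distinct dict2 keys, key q.1 occurs in inv[v] exactly when v ∈ q.2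
lemma count_key_filter (dict2 : List (Int × List Int)) (q : Int × List Int) (v : Int)
    (hq : q ∈ dict2) (hnd : (dict2.map Prod.fst).Nodup) :
    (((dict2.filter (fun r => decide (v ∈ r.2))).map Prod.fst).count q.1 : Int)
    = if v ∈ q.2 then 1 else 0 := by
  induction dict2 with
  | nil => cases hq
  | cons r rest ih =>
    simp only [List.map_cons, List.nodup_cons] at hnd
    rcases List.mem_cons.mp hq with rfl | hmem
    · -- q is the head; q.1 does not occur among rest's keys
      have hzero : ((rest.filter (fun r => decide (v ∈ r.2))).map Prod.fst).count q.1 = 0 := by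
        apply List.count_eq_zero_of_not_mem
        intro hc
        apply hnd.1
        obtain ⟨r', hr', he⟩ := List.mem_map.mp hc
        exact he ▸ List.mem_map.mpr ⟨r', (List.mem_filter.mp hr').1, rfl⟩
      rw [List.filter_cons]
      by_cases hv : v ∈ q.2
      · simp [hv, hzero]
      · simp [hv, hzero]
    · -- q is in the tail; the head's key differs from q.1
      have hne : r.1 ≠ q.1 := by
        intro h
        exact hnd.1 (h ▸ List.mem_map.mpr ⟨q, hmem, rfl⟩)
      rw [List.filter_cons]
      by_cases hv : v ∈ r.2
      · simp only [hv, decide_true, if_true, List.map_cons, List.count_cons]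
        push_cast
        rw [ih hmem hnd.2]
        simp [hne]
      · simp only [hv, decide_false]
        exact ih hmem hnd.2

-- B's counter for the pair (sublist1, q) is exactly A's intersection count
lemma count_eq_inter (dict2 : List (Int × List Int)) (q : Int × List Int) (l1 : List Int)
    (hq : q ∈ dict2) (hnd : (dict2.map Prod.fst).Nodup) :
    (((PySem.Set.ofList l1).foldl (fun cnt v =>
        (((dict2.foldl (fun inv r =>
            (PySem.Set.ofList r.2).foldl (fun inv w => inv.modify w [] (· ++ [r.1])) inv)
          PySem.Dict.empty).getD v [])).foldl
          (fun cnt k2 => cnt.insert k2 (cnt.getD k2 0 + 1)) cnt) PySem.Dict.empty).getD q.1 0)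
    = PySem.Set.len (PySem.Set.inter (PySem.Set.ofList l1) (PySem.Set.ofList q.2)) := by
  rw [cnt_getD]
  have hmap : (PySem.Set.ofList l1).map (fun v =>
      (((dict2.foldl (fun inv r =>
            (PySem.Set.ofList r.2).foldl (fun inv w => inv.modify w [] (· ++ [r.1])) inv)
          PySem.Dict.empty).getD v []).count q.1 : Int))
      = (PySem.Set.ofList l1).map (fun v => if v ∈ q.2 then (1 : Int) else 0) := by
    apply List.map_congr_left
    intro v _
    rw [inv_getD]
    simp only [PySem.Dict.getD_empty, List.nil_append]
    exact count_key_filter dict2 q v hq hnd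
  rw [hmap]
  have hcontains : ∀ x : Int, PySem.Set.contains (PySem.Set.ofList q.2) x = decide (x ∈ q.2) := by
    intro x
    rw [Bool.eq_iff_iff]
    simp [PySem.Set.mem_ofList]
  simp only [PySem.Set.len, PySem.Set.inter]
  rw [List.filter_congr (fun x _ => hcontains x)]
  rw [← List.countP_eq_length_filter]
  simp only [PySem.Dict.getD_empty, zero_add]
  have hs := PySem.List.sum_map_ite_one_zero (fun x : Int => decide (x ∈ q.2)) (PySem.Set.ofList l1)
  simpa using hs

-- the relation between A's loop state and B's loop state
def pvRel (a : Int × Option (Int × Int) × Option Int) (b : Option (Int × Int × Int × Int)) : Prop :=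
  (a = (-1, none, none) ∧ b = none) ∨
  (∃ c t k1 k2, 0 ≤ c ∧ a = (c, some (k1, k2), some t) ∧ b = some (c, t, k1, k2))

-- the two selection loops over dict2 preserve pvRel when the per-pair counts agree
lemma sel_fold (k1 n1 : Int) (l : List (Int × List Int))
    (icf cf : (Int × List Int) → Int)
    (hc : ∀ q ∈ l, cf q = icf q) (hpos : ∀ q ∈ l, 0 ≤ icf q)
    (st : Int × Option (Int × Int) × Option Int) (b : Option (Int × Int × Int × Int))
    (h : pvRel st b) :
    pvRel
      (l.foldl (fun st q =>
        if icf q > st.1 || (icf q == st.1 && pvLtInf (n1 + (q.2.length : Int)) st.2.2)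
           || (icf q == st.1 && pvEqInf (n1 + (q.2.length : Int)) st.2.2 && st.2.1.isNone)
        then (icf q, some (k1, q.1), some (n1 + (q.2.length : Int))) else st) st)
      (l.foldl (fun b q =>
        match b with
        | none => some (cf q, n1 + (q.2.length : Int), k1, q.1)
        | some bb => if cf q > bb.1 || (cf q == bb.1 && n1 + (q.2.length : Int) < bb.2.1)
                     then some (cf q, n1 + (q.2.length : Int), k1, q.1) else some bb) b) := by
  induction l generalizing st b with
  | nil => exact h
  | cons q rest ih =>
    rw [List.foldl_cons, List.foldl_cons]
    refine ih (fun r hr => hc r (List.mem_cons_of_mem _ hr)) (fun r hr => hpos r (List.mem_cons_of_mem _ hr)) _ _ ?_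
    have hq : cf q = icf q := hc q List.mem_cons_self
    have hq0 : 0 ≤ icf q := hpos q List.mem_cons_self
    rcases h with ⟨rfl, rfl⟩ | ⟨c, t, kk1, kk2, hc0, rfl, rfl⟩
    · -- initial state: the first pair is always taken by both
      simp only [pvLtInf, pvEqInf]
      simp [hq, show (-1 : Int) < icf q by omega]
      right; exact ⟨icf q, _, k1, q.1, hq0, rfl, rfl⟩
    · -- established state: the two conditions coincide
      simp only [pvLtInf, pvEqInf, Option.isNone_some, Bool.and_false, Bool.or_false]
      by_cases hcond : (icf q > c ∨ (icf q = c ∧ n1 + (q.2.length : Int) < t))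
      · have h1 : (decide (icf q > c) || (icf q == c && decide (n1 + (q.2.length : Int) < t))) = true := by
          simp; omega
        rw [h1]
        simp only [hq, if_true]
        rw [h1]
        right; exact ⟨icf q, _, k1, q.1, hq0, rfl, rfl⟩
      · have h1 : (decide (icf q > c) || (icf q == c && decide (n1 + (q.2.length : Int) < t))) = false := by
          simp; omega
        rw [h1]
        simp only [hq]
        rw [h1]
        right; exact ⟨c, t, kk1, kk2, hc0, rfl, rfl⟩

-- the outer loops over dict1 preserve pvRel
lemma outer_fold (dict1 dict2 : List (Int × List Int)) (hnd : (dict2.map Prod.fst).Nodup)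
    (st : Int × Option (Int × Int) × Option Int) (b : Option (Int × Int × Int × Int))
    (h : pvRel st b) :
    pvRel
      (dict1.foldl (fun st p =>
        dict2.foldl (fun st q =>
          if PySem.Set.len (PySem.Set.inter (PySem.Set.ofList p.2) (PySem.Set.ofList q.2)) > st.1
             || (PySem.Set.len (PySem.Set.inter (PySem.Set.ofList p.2) (PySem.Set.ofList q.2)) == st.1 && pvLtInf ((p.2.length : Int) + (q.2.length : Int)) st.2.2)
             || (PySem.Set.len (PySem.Set.inter (PySem.Set.ofList p.2) (PySem.Set.ofList q.2)) == st.1 && pvEqInf ((p.2.length : Int) + (q.2.length : Int)) st.2.2 && st.2.1.isNone)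
          then (PySem.Set.len (PySem.Set.inter (PySem.Set.ofList p.2) (PySem.Set.ofList q.2)), some (p.1, q.1), some ((p.2.length : Int) + (q.2.length : Int))) else st) st) st)
      (dict1.foldl (fun b p =>
        dict2.foldl (fun b q =>
          match b with
          | none => some ((((PySem.Set.ofList p.2).foldl (fun cnt v =>
              (((dict2.foldl (fun inv r =>
                  (PySem.Set.ofList r.2).foldl (fun inv w => inv.modify w [] (· ++ [r.1])) inv)
                PySem.Dict.empty).getD v [])).foldl
                (fun cnt k2 => cnt.insert k2 (cnt.getD k2 0 + 1)) cnt) PySem.Dict.empty).getD q.1 0),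
              (p.2.length : Int) + (q.2.length : Int), p.1, q.1)
          | some bb => if (((PySem.Set.ofList p.2).foldl (fun cnt v =>
              (((dict2.foldl (fun inv r =>
                  (PySem.Set.ofList r.2).foldl (fun inv w => inv.modify w [] (· ++ [r.1])) inv)
                PySem.Dict.empty).getD v [])).foldl
                (fun cnt k2 => cnt.insert k2 (cnt.getD k2 0 + 1)) cnt) PySem.Dict.empty).getD q.1 0) > bb.1
              || ((((PySem.Set.ofList p.2).foldl (fun cnt v =>
              (((dict2.foldl (fun inv r =>
                  (PySem.Set.ofList r.2).foldl (fun inv w => inv.modify w [] (· ++ [r.1])) inv)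
                PySem.Dict.empty).getD v [])).foldl
                (fun cnt k2 => cnt.insert k2 (cnt.getD k2 0 + 1)) cnt) PySem.Dict.empty).getD q.1 0) == bb.1
                 && (p.2.length : Int) + (q.2.length : Int) < bb.2.1)
            then some ((((PySem.Set.ofList p.2).foldl (fun cnt v =>
              (((dict2.foldl (fun inv r =>
                  (PySem.Set.ofList r.2).foldl (fun inv w => inv.modify w [] (· ++ [r.1])) inv)
                PySem.Dict.empty).getD v [])).foldl
                (fun cnt k2 => cnt.insert k2 (cnt.getD k2 0 + 1)) cnt) PySem.Dict.empty).getD q.1 0),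
              (p.2.length : Int) + (q.2.length : Int), p.1, q.1)
            else some bb) b) b) := by
  induction dict1 generalizing st b with
  | nil => exact h
  | cons p rest ih =>
    rw [List.foldl_cons, List.foldl_cons]
    refine ih _ _ ?_
    refine sel_fold p.1 (p.2.length : Int) dict2
      (fun q => PySem.Set.len (PySem.Set.inter (PySem.Set.ofList p.2) (PySem.Set.ofList q.2)))
      (fun q => (((PySem.Set.ofList p.2).foldl (fun cnt v =>
          (((dict2.foldl (fun inv r =>
              (PySem.Set.ofList r.2).foldl (fun inv w => inv.modify w [] (· ++ [r.1])) inv)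
            PySem.Dict.empty).getD v [])).foldl
            (fun cnt k2 => cnt.insert k2 (cnt.getD k2 0 + 1)) cnt) PySem.Dict.empty).getD q.1 0))
      (fun q hq => count_eq_inter dict2 q p.2 hq hnd)
      (fun q _ => by
        show (0 : Int) ≤ PySem.Set.len (PySem.Set.inter (PySem.Set.ofList p.2) (PySem.Set.ofList q.2))
        simp only [PySem.Set.len]
        positivity)
      st b h

-- ===== VERDICT (by name: the statement is the Claim_ definition above) =====
theorem max_intersecting_lists_spec : Claim_equal_max_intersecting_lists := by
  intro dict1 dict2 _ hpre
  unfold Spec_max_intersecting_lists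
  unfold max_intersecting_lists max_intersecting_lists_alt
  dsimp only
  have h := outer_fold dict1 dict2 hpre (-1, none, none) none (Or.inl ⟨rfl, rfl⟩)
  rcases h with ⟨h1, h2⟩ | ⟨c, t, k1, k2, _, h1, h2⟩
  · rw [h1, h2]; rfl
  · rw [h1, h2]; rfl
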